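-- pv_equiv track=rewrite | github.com/pypi-data/pypi-mirror-257 | packages/cv-xtractor/cv_xtractor-0.3.0-py3-none-any.whl/cv_xtractor/extract_entities.py | refine_extracted_text
-- ===== SOURCE A (Python) =====
-- def refine_extracted_text(text_after_keyword, refinement_keywords):
--     # List to store refined keywords found in the text
--     refined_keywords = []
--
--     # Iterate through each refinement keyword
--     for keyword in refinement_keywords:
--         # Find the index of the keyword in the text
--         index = text_after_keyword.lower().find(keyword.lower())
--
--         # Check if the keyword is found
--         if index != -1:
--             # Check if the keyword is the only word on the line
--             lines = text_after_keyword.split('\n')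
--             for i, line in enumerate(lines):
--                 if keyword.lower() in line.lower() and line.strip().lower() == keyword.lower():
--                     # Add the keyword and the line number to the refined list
--                     refined_keywords.append((keyword, i + 1))
--                     break
--
--     # Sort the refined keywords based on the line number
--     refined_keywords.sort(key=lambda x: x[1])
--
--     # Get the first refined keyword
--     if refined_keywords:
--         first_refined_keyword = refined_keywords[0][0]
--         return first_refined_keyword
--     else:
--         return text_after_keyword
-- ===== SOURCE B (Python) =====
-- def refine_extracted_text(text_after_keyword, refinement_keywords):
--     # Map each keyword's lowercased form to the first keyword in the list with that form.
--     table = {}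
--     for keyword in refinement_keywords:
--         table.setdefault(keyword.lower(), keyword)
--
--     # Scan the lines in order; the first line that is exactly a keyword decides.
--     for line in text_after_keyword.split('\n'):
--         match = table.get(line.strip().lower())
--         if match is not None:
--             return match
--
--     return text_after_keyword
-- ===== Notes on version B (the rewrite author's own statement) =====
-- stated objective: faster
-- what changed: Replaces the keyword-outer scan (substring search over the whole text plus a line loop per keyword, then a sort) with a single pass over the lines against a keyword table built once, returning at the first matching line.
import Mathlib
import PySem

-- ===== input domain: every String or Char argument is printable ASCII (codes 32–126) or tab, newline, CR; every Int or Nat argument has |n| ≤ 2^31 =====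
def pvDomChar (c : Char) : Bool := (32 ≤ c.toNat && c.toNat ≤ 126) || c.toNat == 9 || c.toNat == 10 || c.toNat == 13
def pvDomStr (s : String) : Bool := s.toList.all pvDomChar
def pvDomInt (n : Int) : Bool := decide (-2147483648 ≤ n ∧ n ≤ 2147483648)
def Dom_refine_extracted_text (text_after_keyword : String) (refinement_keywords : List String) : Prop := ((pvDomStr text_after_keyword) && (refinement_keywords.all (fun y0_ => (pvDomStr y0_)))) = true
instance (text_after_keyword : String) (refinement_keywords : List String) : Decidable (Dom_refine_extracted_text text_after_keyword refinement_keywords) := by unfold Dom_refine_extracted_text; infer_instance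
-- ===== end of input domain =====

-- B replaces A's keyword-outer scan (substring search + per-keyword line loop + sort)
-- by one pass over the lines against a keyword table built once; return values proved equal.


-- ===== PORT A =====

-- 'for i, line in enumerate(lines): if keyword.lower() in line.lower() and line.strip().lower() == keyword.lower(): …; break'
def pvFirstLineA (kw : List Char) : List (List Char) → Int → Option Int
  | [], _ => none
  | line :: rest, i =>
    if PySem.Chars.isIn (PySem.Chars.lower kw) (PySem.Chars.lower line) = true
        ∧ PySem.Chars.lower (PySem.Chars.strip line) = PySem.Chars.lower kw then some i
    else pvFirstLineA kw rest (i + 1)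

def refine_extracted_text (text_after_keyword : String) (refinement_keywords : List String) : String :=
  let refined : List (String × Int) := refinement_keywords.foldl (fun acc keyword =>
    if PySem.Chars.find (PySem.Chars.lower text_after_keyword.toList)
        (PySem.Chars.lower keyword.toList) ≠ -1 then
      match pvFirstLineA keyword.toList (PySem.Chars.splitOn text_after_keyword.toList ['\n']) 0 with
      | some i => acc ++ [(keyword, i + 1)]
      | none => acc
    else acc) []
  match PySem.List.sorted refined (fun x => x.2) false with
  | first :: _ => first.1
  | [] => text_after_keyword

-- ===== PORT B =====

-- 'table.setdefault(keyword.lower(), keyword)' over the keyword list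
def pvTableB (kws : List String) : PySem.Dict (List Char) String :=
  kws.foldl (fun d keyword => d.setdefault (PySem.Chars.lower keyword.toList) keyword) PySem.Dict.empty

-- the line loop: the first line whose stripped lowercased form is a key decides
def pvScanB (table : PySem.Dict (List Char) String) (text : String) : List (List Char) → String
  | [] => text
  | line :: rest =>
    match table.get? (PySem.Chars.lower (PySem.Chars.strip line)) with
    | some m => m
    | none => pvScanB table text rest

def refine_extracted_text_alt (text_after_keyword : String) (refinement_keywords : List String) : String :=
  pvScanB (pvTableB refinement_keywords) text_after_keyword
    (PySem.Chars.splitOn text_after_keyword.toList ['\n'])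

-- ===== PRECONDITION & SPEC =====
def Spec_refine_extracted_text (text_after_keyword : String) (refinement_keywords : List String) (out : String) : Prop := out = refine_extracted_text_alt text_after_keyword refinement_keywords
instance (text_after_keyword : String) (refinement_keywords : List String) (out : String) : Decidable (Spec_refine_extracted_text text_after_keyword refinement_keywords out) := by unfold Spec_refine_extracted_text; infer_instance

-- ===== CLAIM (what is proved, stated in full; the proofs are below) =====
def Claim_equal_refine_extracted_text : Prop := ∀ (text_after_keyword : String) (refinement_keywords : List String), Dom_refine_extracted_text text_after_keyword refinement_keywords → Spec_refine_extracted_text text_after_keyword refinement_keywords (refine_extracted_text text_after_keyword refinement_keywords)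

-- ===== LEMMAS AND PROOFS =====

-- spec-side notions ------------------------------------------------------

-- the lowercased stripped form of a line
def pvKey (line : List Char) : List Char := PySem.Chars.lower (PySem.Chars.strip line)

-- first keyword in the list whose lowercase form is k
def pvFirstKw (k : List Char) : List String → Option String
  | [] => none
  | kw :: rest => if PySem.Chars.lower kw.toList = k then some kw else pvFirstKw k rest

-- first line index (counting from i) whose key is k
def pvFirst (k : List Char) : List (List Char) → Int → Option Int
  | [], _ => none
  | line :: rest, i => if pvKey line = k then some i else pvFirst k rest (i + 1)

-- first keyword hit while scanning the lines in order
def pvHit (kws : List String) : List (List Char) → Option String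
  | [] => none
  | line :: rest =>
    match pvFirstKw (pvKey line) kws with
    | some kw => some kw
    | none => pvHit kws rest

-- A's per-keyword contribution to `refined`
def pvEntry (ls : List (List Char)) (kw : String) : List (String × Int) :=
  match pvFirst (PySem.Chars.lower kw.toList) ls 0 with
  | some i => [(kw, i + 1)]
  | none => []

-- infix facts ------------------------------------------------------------

lemma pvStrip_infix (cs : List Char) : PySem.Chars.strip cs <:+: cs := by
  have h1 : PySem.Chars.strip cs <+: PySem.Chars.lstrip cs := by
    rw [PySem.Chars.strip, PySem.Chars.rstrip]
    conv_rhs => rw [← List.reverse_reverse (PySem.Chars.lstrip cs)]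
    exact List.reverse_prefix.mpr (List.dropWhile_suffix _)
  have h2 : PySem.Chars.lstrip cs <:+ cs := List.dropWhile_suffix _
  exact h1.isInfix.trans h2.isInfix

lemma pvLower_infix {a b : List Char} (h : a <:+: b) :
    PySem.Chars.lower a <:+: PySem.Chars.lower b := by
  simpa [PySem.Chars.lower] using h.map PySem.Chars.lowerChar

lemma pvSplitOn_go_infix (sep : List Char) :
    ∀ (fuel : Nat) (l cur : List Char) (acc : List (List Char)) (x : List Char),
      x ∈ PySem.Chars.splitOn.go sep fuel l cur acc → x ∈ acc ∨ x <:+: (cur.reverse ++ l) := by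
  intro fuel
  induction fuel with
  | zero =>
    intro l cur acc x hx
    simp only [PySem.Chars.splitOn.go, List.mem_reverse, List.mem_cons] at hx
    rcases hx with h | h
    · exact Or.inr (h ▸ List.infix_refl _)
    · exact Or.inl h
  | succ fuel ih =>
    intro l cur acc x hx
    cases l with
    | nil =>
      simp only [PySem.Chars.splitOn.go, List.mem_reverse, List.mem_cons] at hx
      rcases hx with h | h
      · exact Or.inr (h ▸ (List.prefix_append _ _).isInfix)
      · exact Or.inl h
    | cons c rest =>
      simp only [PySem.Chars.splitOn.go] at hx
      by_cases hp : sep.isPrefixOf (c :: rest) = true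
      · rw [if_pos hp] at hx
        rcases ih _ _ _ _ hx with h | h
        · rcases List.mem_cons.mp h with h' | h'
          · exact Or.inr (h' ▸ (List.prefix_append _ _).isInfix)
          · exact Or.inl h'
        · refine Or.inr ?_
          simp only [List.reverse_nil, List.nil_append] at h
          exact h.trans ((List.drop_suffix _ _).isInfix.trans (List.suffix_append _ _).isInfix)
      · rw [if_neg hp] at hx
        rcases ih _ _ _ _ hx with h | h
        · exact Or.inl h
        · right
          simpa [List.append_assoc] using h

lemma pvSplitOn_infix {x s sep : List Char} (h : x ∈ PySem.Chars.splitOn s sep) : x <:+: s := by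
  have := pvSplitOn_go_infix sep (s.length + 1) s [] [] x (by simpa [PySem.Chars.splitOn] using h)
  simpa using this

-- collapsing A's redundant tests ----------------------------------------

lemma pvFirstLineA_eq (kw : String) (ls : List (List Char)) (i : Int) :
    pvFirstLineA kw.toList ls i = pvFirst (PySem.Chars.lower kw.toList) ls i := by
  induction ls generalizing i with
  | nil => rfl
  | cons line rest ih =>
    by_cases h : PySem.Chars.lower (PySem.Chars.strip line) = PySem.Chars.lower kw.toList
    · have hin : PySem.Chars.isIn (PySem.Chars.lower kw.toList) (PySem.Chars.lower line) = true := by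
        rw [PySem.Chars.isIn_iff_infix, ← h]
        exact pvLower_infix (pvStrip_infix line)
      simp [pvFirstLineA, pvFirst, pvKey, h, hin]
    · simp [pvFirstLineA, pvFirst, pvKey, h, ih]

lemma pvFirst_mem {k : List Char} {ls : List (List Char)} {i j : Int}
    (h : pvFirst k ls i = some j) : ∃ l ∈ ls, pvKey l = k := by
  induction ls generalizing i with
  | nil => simp [pvFirst] at h
  | cons line rest ih =>
    by_cases hk : pvKey line = k
    · exact ⟨line, by simp, hk⟩
    · simp only [pvFirst, if_neg hk] at h
      obtain ⟨l, hl, hkl⟩ := ih h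
      exact ⟨l, by simp [hl], hkl⟩

lemma pvFind_ne_of_first {text : String} {kw : String} {j : Int}
    (h : pvFirst (PySem.Chars.lower kw.toList) (PySem.Chars.splitOn text.toList ['\n']) 0 = some j) :
    PySem.Chars.find (PySem.Chars.lower text.toList) (PySem.Chars.lower kw.toList) ≠ -1 := by
  obtain ⟨l, hl, hk⟩ := pvFirst_mem h
  rw [Ne, PySem.Chars.find_eq_neg_one_iff, not_not, ← hk]
  exact pvLower_infix ((pvStrip_infix l).trans (pvSplitOn_infix hl))

-- A's refined list as a flatMap -----------------------------------------

lemma pvRefined_eq (text : String) (kws : List String) :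
    kws.foldl (fun acc keyword =>
      if PySem.Chars.find (PySem.Chars.lower text.toList)
          (PySem.Chars.lower keyword.toList) ≠ -1 then
        match pvFirstLineA keyword.toList (PySem.Chars.splitOn text.toList ['\n']) 0 with
        | some i => acc ++ [(keyword, i + 1)]
        | none => acc
      else acc) [] = kws.flatMap (pvEntry (PySem.Chars.splitOn text.toList ['\n'])) := by
  have hfun : (fun (acc : List (String × Int)) (keyword : String) =>
      if PySem.Chars.find (PySem.Chars.lower text.toList)
          (PySem.Chars.lower keyword.toList) ≠ -1 then
        match pvFirstLineA keyword.toList (PySem.Chars.splitOn text.toList ['\n']) 0 with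
        | some i => acc ++ [(keyword, i + 1)]
        | none => acc
      else acc)
      = fun acc keyword => acc ++ pvEntry (PySem.Chars.splitOn text.toList ['\n']) keyword := by
    funext acc keyword
    rw [pvFirstLineA_eq]
    cases hc : pvFirst (PySem.Chars.lower keyword.toList) (PySem.Chars.splitOn text.toList ['\n']) 0 with
    | some i => simp [pvEntry, hc, pvFind_ne_of_first hc]
    | none => simp [pvEntry, hc]
  rw [hfun, PySem.List.foldl_append_eq_flatMap]
  simp

-- the table and the scan ------------------------------------------------

lemma pvTable_go (kws : List String) : ∀ (d : PySem.Dict (List Char) String) (k : List Char),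
    (kws.foldl (fun d keyword => d.setdefault (PySem.Chars.lower keyword.toList) keyword) d).get? k
      = match d.get? k with | some v => some v | none => pvFirstKw k kws := by
  induction kws with
  | nil =>
    intro d k
    simp only [List.foldl_nil]
    cases d.get? k <;> rfl
  | cons kw rest ih =>
    intro d k
    rw [List.foldl_cons, ih]
    by_cases hk : PySem.Chars.lower kw.toList = k
    · subst hk
      rw [PySem.Dict.get?_setdefault_self]
      cases d.get? (PySem.Chars.lower kw.toList) with
      | some v => rfl
      | none => simp [pvFirstKw]
    · rw [PySem.Dict.get?_setdefault_of_ne d kw (fun e => hk e.symm)]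
      cases d.get? k with
      | some v => rfl
      | none => simp [pvFirstKw, hk]

lemma pvTableB_get? (kws : List String) (k : List Char) :
    (pvTableB kws).get? k = pvFirstKw k kws := by
  rw [pvTableB, pvTable_go kws PySem.Dict.empty k, PySem.Dict.get?_empty]

lemma pvScanB_eq (kws : List String) (text : String) (ls : List (List Char)) :
    pvScanB (pvTableB kws) text ls =
      (match pvHit kws ls with | some kw => kw | none => text) := by
  induction ls with
  | nil => rfl
  | cons line rest ih =>
    simp only [pvScanB, pvHit, pvKey]
    rw [pvTableB_get?]
    cases pvFirstKw (PySem.Chars.lower (PySem.Chars.strip line)) kws with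
    | some kw => rfl
    | none => exact ih

-- the stable-sort head --------------------------------------------------

lemma pvInsertBy_cons_of_lt {α : Type} (key : α → Int) (m : α) (ys : List α)
    (h : ∀ y ∈ ys, key m < key y) :
    PySem.List.insertBy (fun a b => decide (key a < key b)) m ys = m :: ys := by
  cases ys with
  | nil => rfl
  | cons y ys => simp [PySem.List.insertBy, h y (by simp)]

lemma pvFoldl_insertBy_head {α : Type} (key : α → Int) (m : α) (suf : List α)
    (h : ∀ z ∈ suf, key m ≤ key z) :
    ∀ t, suf.foldl (fun acc x => PySem.List.insertBy (fun a b => decide (key a < key b)) x acc) (m :: t)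
      = m :: suf.foldl (fun acc x => PySem.List.insertBy (fun a b => decide (key a < key b)) x acc) t := by
  induction suf with
  | nil => intro t; rfl
  | cons z suf ih =>
    intro t
    have hz : ¬ key z < key m := not_lt.mpr (h z (by simp))
    simp only [List.foldl_cons]
    rw [show PySem.List.insertBy (fun a b => decide (key a < key b)) z (m :: t)
          = m :: PySem.List.insertBy (fun a b => decide (key a < key b)) z t by
        simp [PySem.List.insertBy, hz]]
    exact ih (fun y hy => h y (by simp [hy])) _

lemma pvSorted_head {α : Type} (key : α → Int) (pre suf : List α) (m : α)
    (hpre : ∀ y ∈ pre, key m < key y) (hsuf : ∀ z ∈ suf, key m ≤ key z) :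
    ∃ t, PySem.List.sorted (pre ++ m :: suf) key false = m :: t := by
  rw [PySem.List.sorted_eq_foldl_insertBy, List.foldl_append, List.foldl_cons]
  have hpre' : ∀ y ∈ pre.foldl (fun acc x => PySem.List.insertBy (fun a b => decide (key a < key b)) x acc) [], key m < key y := by
    intro y hy
    rw [← PySem.List.sorted_eq_foldl_insertBy] at hy
    exact hpre y ((PySem.List.mem_sorted _ _ _ _).mp hy)
  rw [pvInsertBy_cons_of_lt key m _ hpre', pvFoldl_insertBy_head key m suf hsuf]
  exact ⟨_, rfl⟩

-- the hit decomposition --------------------------------------------------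

lemma pvHit_none {kws : List String} {ls : List (List Char)} (h : pvHit kws ls = none) :
    ∀ l ∈ ls, pvFirstKw (pvKey l) kws = none := by
  induction ls with
  | nil => simp
  | cons line rest ih =>
    intro l hl
    simp only [pvHit] at h
    cases hc : pvFirstKw (pvKey line) kws with
    | some kw => rw [hc] at h; simp at h
    | none =>
      rw [hc] at h
      rcases List.mem_cons.mp hl with hl' | hl'
      · rw [hl']; exact hc
      · exact ih h l hl'

lemma pvHit_some {kws : List String} {ls : List (List Char)} {kw : String}
    (h : pvHit kws ls = some kw) :
    ∃ ls₁ line ls₂, ls = ls₁ ++ line :: ls₂ ∧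
      (∀ l ∈ ls₁, pvFirstKw (pvKey l) kws = none) ∧
      pvFirstKw (pvKey line) kws = some kw := by
  induction ls with
  | nil => simp [pvHit] at h
  | cons line rest ih =>
    simp only [pvHit] at h
    cases hc : pvFirstKw (pvKey line) kws with
    | some kw' =>
      rw [hc] at h
      exact ⟨[], line, rest, by simp, by simp, by rw [hc, ← h]⟩
    | none =>
      rw [hc] at h
      obtain ⟨ls₁, l₀, ls₂, hsplit, hnone, hfirst⟩ := ih h
      refine ⟨line :: ls₁, l₀, ls₂, by simp [hsplit], ?_, hfirst⟩
      intro l hl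
      rcases List.mem_cons.mp hl with hl' | hl'
      · rw [hl']; exact hc
      · exact hnone l hl'

lemma pvFirstKw_none {k : List Char} {kws : List String} (h : pvFirstKw k kws = none) :
    ∀ kw ∈ kws, PySem.Chars.lower kw.toList ≠ k := by
  induction kws with
  | nil => simp
  | cons kw rest ih =>
    intro kw' hkw'
    by_cases hk : PySem.Chars.lower kw.toList = k
    · simp [pvFirstKw, hk] at h
    · simp only [pvFirstKw, if_neg hk] at h
      rcases List.mem_cons.mp hkw' with h' | h'
      · rw [h']; exact hk
      · exact ih h kw' h'

lemma pvFirstKw_some {k : List Char} {kws : List String} {kw : String}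
    (h : pvFirstKw k kws = some kw) :
    ∃ ka kb, kws = ka ++ kw :: kb ∧ PySem.Chars.lower kw.toList = k ∧
      (∀ kw' ∈ ka, PySem.Chars.lower kw'.toList ≠ k) := by
  induction kws with
  | nil => simp [pvFirstKw] at h
  | cons kw0 rest ih =>
    by_cases hk : PySem.Chars.lower kw0.toList = k
    · simp only [pvFirstKw, if_pos hk, Option.some.injEq] at h
      exact ⟨[], rest, by simp [h], by rw [← h]; exact hk, by simp⟩
    · simp only [pvFirstKw, if_neg hk] at h
      obtain ⟨ka, kb, hsplit, hkk, hnone⟩ := ih h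
      refine ⟨kw0 :: ka, kb, by simp [hsplit], hkk, ?_⟩
      intro kw' hkw'
      rcases List.mem_cons.mp hkw' with h' | h'
      · rw [h']; exact hk
      · exact hnone kw' h'

-- pvFirst facts -----------------------------------------------------------

lemma pvFirst_skip {k : List Char} (ls₁ rest : List (List Char)) :
    ∀ i : Int, (∀ l ∈ ls₁, pvKey l ≠ k) →
      pvFirst k (ls₁ ++ rest) i = pvFirst k rest (i + ls₁.length) := by
  induction ls₁ with
  | nil => intro i h; simp
  | cons l0 ls₁ ih =>
    intro i h
    have hne : pvKey l0 ≠ k := h l0 (by simp)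
    simp only [List.cons_append, pvFirst, if_neg hne]
    rw [ih (i + 1) (fun l hl => h l (List.mem_cons_of_mem _ hl))]
    congr 1
    simp only [List.length_cons]
    push_cast
    ring

lemma pvFirst_ge {k : List Char} {ls : List (List Char)} {i j : Int}
    (h : pvFirst k ls i = some j) : i ≤ j := by
  induction ls generalizing i with
  | nil => simp [pvFirst] at h
  | cons line rest ih =>
    by_cases hk : pvKey line = k
    · simp [pvFirst, hk] at h; omega
    · simp only [pvFirst, if_neg hk] at h
      have := ih h
      omega

-- main equivalence --------------------------------------------------------

theorem pvMain (text : String) (kws : List String) :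
    refine_extracted_text text kws = refine_extracted_text_alt text kws := by
  simp only [refine_extracted_text, refine_extracted_text_alt, pvScanB_eq, pvRefined_eq]
  cases hhit : pvHit kws (PySem.Chars.splitOn text.toList ['\n']) with
  | none =>
    have hnil : kws.flatMap (pvEntry (PySem.Chars.splitOn text.toList ['\n'])) = [] := by
      rw [List.flatMap_eq_nil_iff]
      intro kw hkw
      unfold pvEntry
      cases hc : pvFirst (PySem.Chars.lower kw.toList) (PySem.Chars.splitOn text.toList ['\n']) 0 with
      | none => rfl
      | some j =>
        obtain ⟨l, hl, hkl⟩ := pvFirst_mem hc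
        exact absurd hkl.symm (pvFirstKw_none (pvHit_none hhit l hl) kw hkw)
    rw [hnil]
    rfl
  | some kw0 =>
    obtain ⟨ls₁, line0, ls₂, hls, hnone1, hfk⟩ := pvHit_some hhit
    obtain ⟨ka, kb, hkws, hkey, hka⟩ := pvFirstKw_some hfk
    have hmemkws : ∀ kw ∈ kws, ∀ l ∈ ls₁, pvKey l ≠ PySem.Chars.lower kw.toList := by
      intro kw hkw l hl
      exact fun e => pvFirstKw_none (hnone1 l hl) kw hkw e.symm
    have hkw0 : kw0 ∈ kws := by rw [hkws]; simp
    have hfst : pvFirst (PySem.Chars.lower kw0.toList) (PySem.Chars.splitOn text.toList ['\n']) 0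
        = some (ls₁.length : Int) := by
      rw [hls, pvFirst_skip ls₁ _ 0 (hmemkws kw0 hkw0)]
      simp [pvFirst, hkey.symm]
    have hpre : ∀ y ∈ ka.flatMap (pvEntry (PySem.Chars.splitOn text.toList ['\n'])),
        ((ls₁.length : Int) + 1) < y.2 := by
      intro y hy
      obtain ⟨kw, hkwka, hy⟩ := List.mem_flatMap.mp hy
      have hkwmem : kw ∈ kws := by rw [hkws]; exact List.mem_append_left _ hkwka
      unfold pvEntry at hy
      cases hc : pvFirst (PySem.Chars.lower kw.toList) (PySem.Chars.splitOn text.toList ['\n']) 0 with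
      | none => rw [hc] at hy; simp at hy
      | some j =>
        rw [hc] at hy
        simp only [List.mem_singleton] at hy
        subst hy
        rw [hls, pvFirst_skip ls₁ _ 0 (hmemkws kw hkwmem)] at hc
        have hne : pvKey line0 ≠ PySem.Chars.lower kw.toList :=
          fun e => hka kw hkwka e.symm
        rw [show pvFirst (PySem.Chars.lower kw.toList) (line0 :: ls₂) (0 + (ls₁.length : Int))
              = pvFirst (PySem.Chars.lower kw.toList) ls₂ (0 + (ls₁.length : Int) + 1) by
            simp [pvFirst, hne]] at hc
        have := pvFirst_ge hc
        dsimp only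
        omega
    have hall : ∀ kw ∈ kws, ∀ j : Int,
        pvFirst (PySem.Chars.lower kw.toList) (PySem.Chars.splitOn text.toList ['\n']) 0 = some j →
        (ls₁.length : Int) ≤ j := by
      intro kw hkw j hc
      rw [hls, pvFirst_skip ls₁ _ 0 (hmemkws kw hkw)] at hc
      have := pvFirst_ge hc
      omega
    have hsuf : ∀ z ∈ kb.flatMap (pvEntry (PySem.Chars.splitOn text.toList ['\n'])),
        ((ls₁.length : Int) + 1) ≤ z.2 := by
      intro z hz
      obtain ⟨kw, hkwkb, hz⟩ := List.mem_flatMap.mp hz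
      have hkwmem : kw ∈ kws := by
        rw [hkws]; exact List.mem_append_right _ (List.mem_cons_of_mem _ hkwkb)
      unfold pvEntry at hz
      cases hc : pvFirst (PySem.Chars.lower kw.toList) (PySem.Chars.splitOn text.toList ['\n']) 0 with
      | none => rw [hc] at hz; simp at hz
      | some j =>
        rw [hc] at hz
        simp only [List.mem_singleton] at hz
        subst hz
        have := hall kw hkwmem j hc
        dsimp only
        omega
    have hsplit : kws.flatMap (pvEntry (PySem.Chars.splitOn text.toList ['\n']))
        = ka.flatMap (pvEntry (PySem.Chars.splitOn text.toList ['\n']))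
          ++ (kw0, (ls₁.length : Int) + 1) :: kb.flatMap (pvEntry (PySem.Chars.splitOn text.toList ['\n'])) := by
      rw [hkws, List.flatMap_append, List.flatMap_cons]
      congr 1
      simp [pvEntry, hfst]
    rw [hsplit]
    obtain ⟨t, ht⟩ := pvSorted_head (fun x => x.2) _ _ ((kw0, (ls₁.length : Int) + 1)) hpre hsuf
    rw [ht]

-- ===== VERDICT (by name: the statement is the Claim_ definition above) =====
theorem refine_extracted_text_spec : Claim_equal_refine_extracted_text := by
  intro text kws _
  exact pvMain text kws
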